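-- pv_equiv track=rewrite | github.com/LarisaOvchinnikova/python_codewars | Sum of factorials with letters.py | factorial_sum
-- ===== SOURCE A (Python) =====
-- import math
--
-- def factorial_sum(st):
--     s = ''
--     for el in st:
--         if el.isdigit():
--             s += el
--         else:
--             s += " "
--     return sum([math.factorial(int(el)) for el in s.split(" ") if el != ''])
-- ===== SOURCE B (Python) =====
-- import math
--
-- def factorial_sum(st):
--     total = 0
--     cur = ''
--     for ch in st:
--         if ch.isdigit():
--             cur += ch
--         else:
--             if cur != '':
--                 total += math.factorial(int(cur))
--                 cur = ''
--     if cur != '':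
--         total += math.factorial(int(cur))
--     return total
-- ===== Notes on version B (the rewrite author's own statement) =====
-- stated objective: faster
-- what changed: Replaces A's mask-then-split-then-sum pipeline (build a substituted string, split on spaces, sum a comprehension) by a single-pass state machine over the characters with a running total and a current-digit-group buffer, flushed on non-digits and once at the end.
import Mathlib
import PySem

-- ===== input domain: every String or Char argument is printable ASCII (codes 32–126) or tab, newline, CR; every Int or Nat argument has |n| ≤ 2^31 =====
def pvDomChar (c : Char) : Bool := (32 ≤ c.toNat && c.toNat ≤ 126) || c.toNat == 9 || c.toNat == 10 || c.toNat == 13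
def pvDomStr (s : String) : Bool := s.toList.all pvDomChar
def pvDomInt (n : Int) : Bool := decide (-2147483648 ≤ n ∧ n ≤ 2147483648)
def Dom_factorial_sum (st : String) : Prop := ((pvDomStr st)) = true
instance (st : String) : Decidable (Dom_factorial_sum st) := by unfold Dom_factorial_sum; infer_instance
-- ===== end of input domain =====

-- B replaces A's mask/split/sum pipeline by a single-pass state machine (running total +
-- current digit-group buffer, flushed on non-digits and at the end); same O(n), measured constant-factor faster.

-- ===== PORT A =====
-- math.factorial(int(el)): on the digit-only nonempty groups both programs feed it,
-- int() always succeeds and is nonnegative, so the none branch is unreachable.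
def pyFactInt (g : List Char) : Int :=
  match PySem.Int.ofChars? g with
  | some n => (Int.ofNat n.toNat.factorial)
  | none => 0

def factorial_sum (st : String) : Int :=
  let s := st.toList.foldl
    (fun s el => if PySem.Chars.isdigit el then s ++ [el] else s ++ [' ']) []
  (((PySem.Chars.splitOn s [' ']).filter (fun el => el ≠ [])).map pyFactInt).sum

-- ===== PORT B =====
-- the loop body of Source B: digit → extend the buffer; non-digit → flush a nonempty buffer
def stepB (p : Int × List Char) (ch : Char) : Int × List Char :=
  if PySem.Chars.isdigit ch then (p.1, p.2 ++ [ch])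
  else if p.2 ≠ [] then (p.1 + pyFactInt p.2, ([] : List Char)) else (p.1, [])

def factorial_sum_alt (st : String) : Int :=
  let p := st.toList.foldl stepB (0, [])
  if p.2 ≠ [] then p.1 + pyFactInt p.2 else p.1

-- ===== PRECONDITION & SPEC =====
def Spec_factorial_sum (st : String) (out : Int) : Prop := out = factorial_sum_alt st
instance (st : String) (out : Int) : Decidable (Spec_factorial_sum st out) := by unfold Spec_factorial_sum; infer_instance

-- ===== CLAIM (what is proved, stated in full; the proofs are below) =====
def Claim_equal_factorial_sum : Prop := ∀ (st : String), Dom_factorial_sum st → Spec_factorial_sum st (factorial_sum st)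

-- ===== LEMMAS AND PROOFS =====

-- the character A substitutes for el
def mch (el : Char) : Char := if PySem.Chars.isdigit el then el else ' '

-- simple structural split on ' ' (keeps empty pieces), reference for PySem.Chars.splitOn
def sp : List Char → List Char → List (List Char)
  | [], cur => [cur]
  | c :: rest, cur => if c = ' ' then cur :: sp rest [] else sp rest (cur ++ [c])

def sumF (gs : List (List Char)) : Int := ((gs.filter (fun el => el ≠ [])).map pyFactInt).sum

def flushB (p : Int × List Char) : Int := if p.2 ≠ [] then p.1 + pyFactInt p.2 else p.1

lemma mask_foldl (cs : List Char) (s0 : List Char) :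
    cs.foldl (fun s el => if PySem.Chars.isdigit el then s ++ [el] else s ++ [' ']) s0
      = s0 ++ cs.map mch := by
  induction cs generalizing s0 with
  | nil => simp
  | cons c cs ih => simp [mch, ih]; split <;> simp

lemma go_eq_sp (fuel : Nat) (l cur : List Char) (acc : List (List Char)) (h : l.length ≤ fuel) :
    PySem.Chars.splitOn.go [' '] fuel l cur acc = acc.reverse ++ sp l cur.reverse := by
  induction fuel generalizing l cur acc with
  | zero =>
    have hl : l = [] := List.eq_nil_of_length_eq_zero (Nat.le_zero.mp h)
    subst hl
    simp [PySem.Chars.splitOn.go, sp]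
  | succ f ih =>
    cases l with
    | nil => simp [PySem.Chars.splitOn.go, sp]
    | cons c rest =>
      rw [PySem.Chars.splitOn.go]
      by_cases hc : c = ' '
      · subst hc
        have hp : List.isPrefixOf [' '] (' ' :: rest) = true := by
          simp [List.isPrefixOf]
        rw [if_pos hp]
        show PySem.Chars.splitOn.go [' '] f rest [] (cur.reverse :: acc)
              = acc.reverse ++ sp (' ' :: rest) cur.reverse
        rw [ih rest [] (cur.reverse :: acc) (by simpa using Nat.le_of_succ_le_succ h)]
        simp [sp]
      · have hp : List.isPrefixOf [' '] (c :: rest) = false := by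
          simp [List.isPrefixOf]; exact fun h => absurd h.symm hc
        rw [if_neg (by simp [hp])]
        rw [ih rest (c :: cur) acc (by simpa using Nat.le_of_succ_le_succ h)]
        simp [sp, hc]

lemma splitOn_eq_sp (s : List Char) :
    PySem.Chars.splitOn s [' '] = sp s [] := by
  rw [PySem.Chars.splitOn, go_eq_sp (s.length + 1) s [] [] (by omega)]
  simp

lemma sumF_cons (g : List Char) (gs : List (List Char)) :
    sumF (g :: gs) = (if g ≠ [] then pyFactInt g else 0) + sumF gs := by
  unfold sumF
  by_cases h : g = [] <;> simp [h]

lemma mch_digit {c : Char} (h : PySem.Chars.isdigit c) : mch c = c := by simp [mch, h]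
lemma mch_nondigit {c : Char} (h : ¬ PySem.Chars.isdigit c) : mch c = ' ' := by simp [mch, h]

lemma digit_ne_space {c : Char} (h : PySem.Chars.isdigit c) : c ≠ ' ' := by
  intro he; subst he; simp [PySem.Chars.isdigit] at h

lemma main_lemma (cs : List Char) (t : Int) (g : List Char) :
    flushB (cs.foldl stepB (t, g)) = t + sumF (sp (cs.map mch) g) := by
  induction cs generalizing t g with
  | nil =>
    simp only [List.map_nil, List.foldl_nil, sp, flushB, sumF]
    by_cases h : g = [] <;> simp [h]
  | cons c cs ih =>
    by_cases hd : PySem.Chars.isdigit c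
    · have h1 : stepB (t, g) c = (t, g ++ [c]) := by simp [stepB, hd]
      simp only [List.map_cons, List.foldl_cons, h1, mch_digit hd, ih]
      have h2 : sp (c :: cs.map mch) g = sp (cs.map mch) (g ++ [c]) := by
        simp [sp, digit_ne_space hd]
      rw [h2]
    · rw [List.map_cons, mch_nondigit hd]
      by_cases hg : g = []
      · subst hg
        have h1 : stepB (t, []) c = (t, []) := by simp [stepB, hd]
        simp only [List.foldl_cons, h1, ih]
        have h2 : sp (' ' :: cs.map mch) [] = [] :: sp (cs.map mch) [] := by simp [sp]
        rw [h2, sumF_cons]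
        simp
      · have h1 : stepB (t, g) c = (t + pyFactInt g, []) := by simp [stepB, hd, hg]
        simp only [List.foldl_cons, h1, ih]
        have h2 : sp (' ' :: cs.map mch) g = g :: sp (cs.map mch) [] := by simp [sp]
        rw [h2, sumF_cons, if_pos hg]
        ring

-- ===== VERDICT (by name: the statement is the Claim_ definition above) =====
theorem factorial_sum_spec : Claim_equal_factorial_sum := by
  intro st _
  show factorial_sum st = factorial_sum_alt st
  have hA : factorial_sum st = sumF (sp (st.toList.map mch) []) := by
    show (((PySem.Chars.splitOn
        (st.toList.foldl
          (fun s el => if PySem.Chars.isdigit el then s ++ [el] else s ++ [' ']) [])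
        [' ']).filter (fun el => el ≠ [])).map pyFactInt).sum
      = sumF (sp (st.toList.map mch) [])
    rw [mask_foldl, List.nil_append, splitOn_eq_sp]
    rfl
  have hB : factorial_sum_alt st = flushB (st.toList.foldl stepB (0, [])) := rfl
  rw [hA, hB, main_lemma, zero_add]
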